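-- pv_equiv track=rewrite | github.com/phuctruong/solace-browser | src/recipes/recipe_parser.py | _build_linear_dag
-- ===== SOURCE A (Python) =====
-- from typing import Any, Dict, Iterable, List, Tuple
--
-- class RecipeValidationError(ValueError):
--     """Raised when a parsed recipe is structurally invalid."""
--
-- def _build_linear_dag(steps: Tuple[Dict[str, Any], ...]) -> Tuple[Tuple[str, ...], Tuple[Dict[str, str], ...]]:
--     if not steps:
--         raise RecipeValidationError("cannot build DAG from empty steps")
--
--     nodes = tuple(step["step_id"] for step in steps)
--     edges: List[Dict[str, str]] = [{"from": "[*]", "to": nodes[0], "condition": "start"}]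
--     for left, right in zip(nodes, nodes[1:]):
--         edges.append({"from": left, "to": right, "condition": "always"})
--     edges.append({"from": nodes[-1], "to": "[*]", "condition": "done"})
--     return nodes, tuple(edges)
-- ===== SOURCE B (Python) =====
-- class RecipeValidationError(ValueError):
--     """Raised when a parsed recipe is structurally invalid."""
--
-- def _build_linear_dag(steps):
--     if not steps:
--         raise RecipeValidationError("cannot build DAG from empty steps")
--
--     def go(prev, rest):
--         # recursion on the remaining steps: returns the node ids of `rest`
--         # and all edges leaving `prev` onward (ending with the done edge)
--         if not rest:
--             return (), ({"from": prev, "to": "[*]", "condition": "done"},)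
--         cur = rest[0]["step_id"]
--         ns, es = go(cur, rest[1:])
--         return (cur, *ns), ({"from": prev, "to": cur, "condition": "always"}, *es)
--
--     first = steps[0]["step_id"]
--     ns, es = go(first, steps[1:])
--     return (first, *ns), ({"from": "[*]", "to": first, "condition": "start"}, *es)
-- ===== Notes on version B (the rewrite author's own statement) =====
-- stated objective: alternative
-- what changed: A builds the node tuple first and then assembles edges in three phases (start literal, zip loop over adjacent pairs, appended done edge); B is a single structural recursion over the step list that carries the previous node id and produces the remaining nodes and all remaining edges together, with the done edge as the recursion's base case and no zip/index pass.
import Mathlib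
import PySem

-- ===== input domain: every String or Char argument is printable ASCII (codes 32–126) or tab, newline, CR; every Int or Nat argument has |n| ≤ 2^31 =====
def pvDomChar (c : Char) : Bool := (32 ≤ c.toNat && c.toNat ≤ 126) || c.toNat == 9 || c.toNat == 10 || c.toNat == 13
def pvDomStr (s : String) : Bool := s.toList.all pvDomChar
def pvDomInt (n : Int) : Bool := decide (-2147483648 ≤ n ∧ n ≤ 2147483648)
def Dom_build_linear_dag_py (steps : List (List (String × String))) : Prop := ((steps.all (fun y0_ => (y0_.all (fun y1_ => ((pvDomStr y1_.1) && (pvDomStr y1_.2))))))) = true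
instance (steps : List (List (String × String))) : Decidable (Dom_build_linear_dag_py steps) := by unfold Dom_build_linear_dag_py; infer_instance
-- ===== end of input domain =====

-- B replaces A's staged construction (node pass, then start edge + zip loop + appended
-- done edge) by one structural recursion over the steps that builds nodes and edges
-- together; same cost, different decomposition.

-- ===== PORT A =====
-- step["step_id"]: first-match dict lookup; Pre_ guarantees the key is present,
-- so the getD default is never consulted on admitted inputs.
def pvStepId (step : List (String × String)) : String :=
  ((step.find? (fun p => p.1 == "step_id")).map Prod.snd).getD ""

def build_linear_dag_py (steps : List (List (String × String))) : List String × (List (List (String × String))) :=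
  let nodes := steps.map pvStepId
  let edges : List (List (String × String)) :=
    [[("from", "[*]"), ("to", nodes.headD ""), ("condition", "start")]]
  let edges := (nodes.zip nodes.tail).foldl
    (fun acc lr => acc ++ [[("from", lr.1), ("to", lr.2), ("condition", "always")]]) edges
  let edges := edges ++ [[("from", nodes.getLastD ""), ("to", "[*]"), ("condition", "done")]]
  (nodes, edges)

-- ===== PORT B =====
-- Source B's inner recursion `go(prev, rest)`.
def pvGo (prev : String) (rest : List (List (String × String))) :
    List String × List (List (String × String)) :=
  match rest with
  | [] => ([], [[("from", prev), ("to", "[*]"), ("condition", "done")]])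
  | s :: t =>
    let cur := pvStepId s
    let r := pvGo cur t
    (cur :: r.1, [("from", prev), ("to", cur), ("condition", "always")] :: r.2)

def build_linear_dag_py_alt (steps : List (List (String × String))) : List String × (List (List (String × String))) :=
  match steps with
  | [] => ([], [])  -- unreachable under Pre_ (the Python raises here)
  | s :: t =>
    let first := pvStepId s
    let r := pvGo first t
    (first :: r.1, [("from", "[*]"), ("to", first), ("condition", "start")] :: r.2)

-- ===== PRECONDITION & SPEC =====
-- Pre_ excludes exactly the inputs where A raises: empty steps (RecipeValidationError)
-- and steps missing the "step_id" key (KeyError).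
def Pre_build_linear_dag_py (steps : List (List (String × String))) : Prop :=
  steps ≠ [] ∧ ∀ step ∈ steps, (step.find? (fun p => p.1 == "step_id")).isSome
instance (steps : List (List (String × String))) : Decidable (Pre_build_linear_dag_py steps) := by unfold Pre_build_linear_dag_py; infer_instance

def pvWitness_build_linear_dag_py : (List (List (String × String))) :=
  [[("step_id", "a")], [("step_id", "b"), ("x", "y")]]

def Spec_build_linear_dag_py (steps : List (List (String × String))) (out : List String × (List (List (String × String)))) : Prop := out = build_linear_dag_py_alt steps
instance (steps : List (List (String × String))) (out : List String × (List (List (String × String)))) : Decidable (Spec_build_linear_dag_py steps out) := by unfold Spec_build_linear_dag_py; infer_instance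

-- ===== CLAIM (what is proved, stated in full; the proofs are below) =====
def Claim_equal_build_linear_dag_py : Prop := ∀ (steps : List (List (String × String))), Dom_build_linear_dag_py steps → Pre_build_linear_dag_py steps → Spec_build_linear_dag_py steps (build_linear_dag_py steps)

-- ===== LEMMAS AND PROOFS =====

-- A's foldl-append loop is init ++ map.
theorem pv_foldl_append {α β : Type} (f : α → β) (l : List α) (init : List β) :
    l.foldl (fun acc x => acc ++ [f x]) init = init ++ l.map f := by
  induction l generalizing init with
  | nil => simp
  | cons a t ih => simp [List.foldl, ih, List.append_assoc]

-- Characterisation of B's recursion in terms of A's staged pieces.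
theorem pv_go_eq (prev : String) (rest : List (List (String × String))) :
    pvGo prev rest =
      (rest.map pvStepId,
       ((prev :: rest.map pvStepId).zip (rest.map pvStepId)).map
          (fun lr => [("from", lr.1), ("to", lr.2), ("condition", "always")])
        ++ [[("from", (prev :: rest.map pvStepId).getLastD ""), ("to", "[*]"), ("condition", "done")]]) := by
  induction rest generalizing prev with
  | nil => simp [pvGo]
  | cons s t ih => simp [pvGo, ih (pvStepId s), List.getLastD]

-- ===== VERDICT (by name: the statement is the Claim_ definition above) =====
theorem build_linear_dag_py_spec : Claim_equal_build_linear_dag_py := by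
  intro steps _ hpre
  unfold Spec_build_linear_dag_py build_linear_dag_py build_linear_dag_py_alt
  obtain ⟨hne, -⟩ := hpre
  cases steps with
  | nil => exact absurd rfl hne
  | cons s t =>
    dsimp only [List.map_cons]
    rw [pv_foldl_append, pv_go_eq]
    simp
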